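-- pv_equiv track=rewrite | github.com/vamsi/pi | packages/pi-tui/src/pi/tui/autocomplete.py | find_unclosed_quote_start
-- ===== SOURCE A (Python) =====
-- def find_unclosed_quote_start(text: str) -> int | None:
--     """Find the start position of an unclosed double-quote, or None."""
--     in_quotes = False
--     quote_start = -1
--
--     for i in range(len(text)):
--         if text[i] == '"':
--             in_quotes = not in_quotes
--             if in_quotes:
--                 quote_start = i
--
--     return quote_start if in_quotes else None
-- ===== SOURCE B (Python) =====
-- def find_unclosed_quote_start(text: str) -> int | None:
--     """Find the start position of an unclosed double-quote, or None."""
--     if text.count('"') % 2 == 1: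
--         return text.rfind('"')
--     return None
-- ===== Notes on version B (the rewrite author's own statement) =====
-- stated objective: simpler
-- what changed: Replaces the stateful single-pass toggle loop (in_quotes flag plus tracked start index) by a parity test on the total quote count followed by a last-occurrence lookup: an odd number of quotes means the last quote is the unmatched opener.
import Mathlib
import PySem

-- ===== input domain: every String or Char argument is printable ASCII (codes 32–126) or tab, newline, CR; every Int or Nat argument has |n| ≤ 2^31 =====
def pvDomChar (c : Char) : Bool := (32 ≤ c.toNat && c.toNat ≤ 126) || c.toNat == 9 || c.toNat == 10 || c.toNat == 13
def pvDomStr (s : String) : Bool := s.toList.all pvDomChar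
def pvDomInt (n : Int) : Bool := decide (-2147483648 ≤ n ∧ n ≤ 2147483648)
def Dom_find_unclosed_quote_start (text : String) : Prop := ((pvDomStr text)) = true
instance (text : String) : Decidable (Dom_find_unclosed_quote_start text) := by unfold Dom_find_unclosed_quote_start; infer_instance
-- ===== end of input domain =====

-- B replaces A's stateful toggle loop by a quote-count parity test plus a last-occurrence lookup (objective: simpler).

-- ===== PORT A =====
def find_unclosed_quote_start (text : String) : Option Int :=
  let cs := text.toList
  let st := (PySem.List.pyRange 0 (PySem.Str.len text) 1).foldl
    (fun (s : Bool × Int) i =>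
      if PySem.List.pyGetD cs i ' ' = '"' then
        let in_quotes := !s.1
        (in_quotes, if in_quotes then i else s.2)
      else s)
    (false, -1)
  if st.1 then some st.2 else none

-- ===== PORT B =====
def find_unclosed_quote_start_alt (text : String) : Option Int :=
  if PySem.Str.count text "\"" % 2 = 1 then some (PySem.Str.rfind text "\"") else none

-- ===== PRECONDITION & SPEC =====
def Spec_find_unclosed_quote_start (text : String) (out : Option Int) : Prop := out = find_unclosed_quote_start_alt text
instance (text : String) (out : Option Int) : Decidable (Spec_find_unclosed_quote_start text out) := by unfold Spec_find_unclosed_quote_start; infer_instance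

-- ===== CLAIM (what is proved, stated in full; the proofs are below) =====
def Claim_equal_find_unclosed_quote_start : Prop := ∀ (text : String), Dom_find_unclosed_quote_start text → Spec_find_unclosed_quote_start text (find_unclosed_quote_start text)

-- ===== LEMMAS AND PROOFS =====

-- index of the last '"' in a list, -1 if none (proof-side specification value)
def pvLastQ : List Char → Int
  | [] => -1
  | c :: t => if 0 ≤ pvLastQ t then pvLastQ t + 1 else if c = '"' then 0 else -1

theorem pvLastQ_nonneg_iff (s : List Char) : 0 ≤ pvLastQ s ↔ s.count '"' ≠ 0 := by
  induction s with
  | nil => simp [pvLastQ]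
  | cons c t ih =>
    by_cases h : (0 : Int) ≤ pvLastQ t
    · simp [pvLastQ, h, List.count_cons, (ih.mp h)]
      omega
    · by_cases hc : c = '"'
      · simp [pvLastQ, h, hc, List.count_cons]
      · simp [pvLastQ, h, hc]
        by_contra hcnt
        exact h (ih.mpr hcnt)

theorem pvLastQ_append_singleton (l : List Char) (x : Char) :
    pvLastQ (l ++ [x]) = if x = '"' then (l.length : Int) else pvLastQ l := by
  induction l with
  | nil => by_cases hx : x = '"' <;> simp [pvLastQ, hx]
  | cons c t ih =>
    by_cases hx : x = '"'
    · have ht : (0 : Int) ≤ pvLastQ (t ++ [x]) := by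
        rw [pvLastQ_nonneg_iff]; simp [hx]
      simp only [List.cons_append, pvLastQ, if_pos ht]
      rw [ih, if_pos hx]
      simp [hx]
    · simp only [List.cons_append, pvLastQ, ih, if_neg hx]

-- ===== characterization of B's primitives for the single-character needle '"' =====

theorem pv_count_go (s : List Char) : ∀ (fuel acc : Nat), s.length ≤ fuel →
    PySem.Chars.count.go ['"'] fuel s acc = acc + s.count '"' := by
  induction s with
  | nil =>
    intro fuel acc _
    rw [PySem.Chars.count.go.eq_def]
    cases fuel <;> simp
  | cons c t ih =>
    intro fuel acc hf
    cases fuel with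
    | zero => simp at hf
    | succ f =>
      rw [PySem.Chars.count.go.eq_def]
      by_cases hc : c = '"'
      · have hp : List.isPrefixOf ['"'] (c :: t) = true := by
          simp [List.isPrefixOf, hc]
        simp only [hp, if_true]
        simp only [List.length_cons] at hf
        rw [show List.drop (['"'] : List Char).length (c :: t) = t from rfl]
        rw [ih f (acc + 1) (by omega)]
        simp [List.count_cons, hc]
        omega
      · have hp : List.isPrefixOf ['"'] (c :: t) = false := by
          simp [List.isPrefixOf]
          exact fun h => absurd h.symm hc
        simp only [hp]
        simp only [List.length_cons] at hf
        simp only [Bool.false_eq_true, if_false]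
        rw [ih f acc (by omega)]
        simp [List.count_cons, hc]

theorem pv_count_singleton (s : List Char) :
    PySem.Chars.count s ['"'] = s.count '"' := by
  rw [PySem.Chars.count]
  simp only [List.isEmpty_cons, Bool.false_eq_true, if_false]
  rw [pv_count_go s s.length 0 le_rfl]
  simp

theorem pv_rfind_go (s : List Char) : ∀ (j : Nat),
    PySem.Chars.rfind.go s ['"'] j =
      (if (s.take (j+1)).count '"' = 0 then -1 else pvLastQ (s.take (j+1))) := by
  intro j
  induction j with
  | zero =>
    rw [PySem.Chars.rfind.go]
    cases s with
    | nil => simp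
    | cons c t =>
      by_cases hc : c = '"'
      · have hp : List.isPrefixOf ['"'] (c :: t) = true := by simp [List.isPrefixOf, hc]
        simp [hp, hc, pvLastQ]
      · have hp : List.isPrefixOf ['"'] (c :: t) = false := by
          simp [List.isPrefixOf]; exact fun h => absurd h.symm hc
        simp [hp, List.count_cons, hc, pvLastQ]
  | succ j ih =>
    rw [PySem.Chars.rfind.go]
    by_cases hlt : j + 1 < s.length
    · have hdrop : s.drop (j+1) = s[j+1] :: s.drop (j+2) := List.drop_eq_getElem_cons hlt
      have htake : s.take (j+1+1) = s.take (j+1) ++ [s[j+1]] := by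
        rw [List.take_add_one]
        simp [List.getElem?_eq_getElem hlt]
      by_cases hc : s[j+1] = '"'
      · have hp : List.isPrefixOf ['"'] (s.drop (j+1)) = true := by
          rw [hdrop]; simp [List.isPrefixOf, hc]
        rw [if_pos hp]
        rw [htake, pvLastQ_append_singleton, if_pos hc]
        have hcnt : ¬ (s.take (j+1) ++ [s[j+1]]).count '"' = 0 := by
          simp [List.count_append, hc]
        rw [if_neg hcnt]
        have hlen : (s.take (j+1)).length = j + 1 := by
          simp; omega
        rw [hlen]
      · have hp : List.isPrefixOf ['"'] (s.drop (j+1)) = false := by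
          rw [hdrop]; simp [List.isPrefixOf]
          exact fun h => absurd h.symm hc
        rw [if_neg (by simp [hp])]
        have hcc : (s.take (j+1+1)).count '"' = (s.take (j+1)).count '"' := by
          rw [htake, List.count_append]
          simp [List.count_cons, hc]
        rw [ih, hcc, htake, pvLastQ_append_singleton, if_neg hc]
    · have hdrop : s.drop (j+1) = [] := List.drop_eq_nil_of_le (by omega)
      have hp : List.isPrefixOf ['"'] (s.drop (j+1)) = false := by rw [hdrop]; rfl
      rw [if_neg (by simp [hp])]
      rw [ih]
      have h1 : s.take (j+1) = s := List.take_of_length_le (by omega)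
      have h2 : s.take (j+1+1) = s := List.take_of_length_le (by omega)
      rw [h1, h2]

theorem pv_rfind_singleton (s : List Char) :
    PySem.Chars.rfind s ['"'] = if s.count '"' = 0 then -1 else pvLastQ s := by
  rw [PySem.Chars.rfind, pv_rfind_go s s.length]
  rw [List.take_of_length_le (by omega)]

-- ===== characterization of A's toggle loop =====

-- A's loop body as a function of (state, (index, character))
def pvStepA (s : Bool × Int) (p : Int × Char) : Bool × Int :=
  if p.2 = '"' then
    let in_quotes := !s.1
    (in_quotes, if in_quotes then p.1 else s.2)
  else s

theorem pv_loopA_fst (s : List Char) : ∀ (k : Int) (b : Bool) (q : Int),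
    ((PySem.List.enumerate s k).foldl pvStepA (b, q)).1 = (b ^^ decide (s.count '"' % 2 = 1)) := by
  induction s with
  | nil => intro k b q; simp [PySem.List.enumerate]
  | cons c t ih =>
    intro k b q
    simp only [PySem.List.enumerate, List.foldl_cons]
    by_cases hc : c = '"'
    · rw [show pvStepA (b, q) (k, c) = (!b, if !b then k else q) by simp [pvStepA, hc]]
      rw [ih]
      simp [List.count_cons, hc, Nat.add_mod]
      cases b <;> by_cases h : t.count '"' % 2 = 1 <;> simp [h] <;> omega
    · rw [show pvStepA (b, q) (k, c) = (b, q) by simp [pvStepA, hc]]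
      rw [ih]
      simp [List.count_cons, hc]

theorem pv_loopA_snd (s : List Char) : ∀ (k : Int) (b : Bool) (q : Int),
    ((PySem.List.enumerate s k).foldl pvStepA (b, q)).1 = true →
    ((PySem.List.enumerate s k).foldl pvStepA (b, q)).2 =
      (if s.count '"' = 0 then q else k + pvLastQ s) := by
  induction s with
  | nil => intro k b q _; simp [PySem.List.enumerate]
  | cons c t ih =>
    intro k b q htrue
    simp only [PySem.List.enumerate, List.foldl_cons] at htrue ⊢
    by_cases hc : c = '"'
    · rw [show pvStepA (b, q) (k, c) = (!b, if !b then k else q) by simp [pvStepA, hc]] at htrue ⊢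
      rw [ih (k+1) (!b) _ htrue]
      by_cases ht : t.count '"' = 0
      · have hq : pvLastQ t < 0 := by
          have := (pvLastQ_nonneg_iff t).not
          simp [ht] at this; omega
        have hfst := pv_loopA_fst t (k+1) (!b) (if !b then k else q)
        rw [htrue] at hfst
        have hb : (!b) = true := by
          simp [ht] at hfst
          cases b <;> simp_all
        simp [ht, List.count_cons, hc, pvLastQ, hb, not_le.mpr hq]
      · have hq : (0:Int) ≤ pvLastQ t := (pvLastQ_nonneg_iff t).mpr ht
        simp [ht, List.count_cons, hc, pvLastQ, hq]
        omega
    · rw [show pvStepA (b, q) (k, c) = (b, q) by simp [pvStepA, hc]] at htrue ⊢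
      rw [ih (k+1) b q htrue]
      by_cases ht : t.count '"' = 0
      · simp [ht, List.count_cons, hc]
      · have hq : (0:Int) ≤ pvLastQ t := (pvLastQ_nonneg_iff t).mpr ht
        simp [ht, List.count_cons, hc, pvLastQ, hq]
        omega

-- the port's range-with-indexing fold IS the enumerate fold
theorem pv_portA_fold (cs : List Char) (init : Bool × Int) :
    (PySem.List.pyRange 0 (cs.length) 1).foldl
      (fun (s : Bool × Int) i =>
        if PySem.List.pyGetD cs i ' ' = '"' then
          let in_quotes := !s.1
          (in_quotes, if in_quotes then i else s.2)
        else s) init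
    = (PySem.List.enumerate cs 0).foldl pvStepA init := by
  rw [PySem.List.enumerate_eq_map_pyRange (d := ' '), List.foldl_map]
  rfl

-- ===== VERDICT (by name: the statement is the Claim_ definition above) =====
theorem find_unclosed_quote_start_spec : Claim_equal_find_unclosed_quote_start := by
  unfold Claim_equal_find_unclosed_quote_start
  intro text _
  unfold Spec_find_unclosed_quote_start find_unclosed_quote_start find_unclosed_quote_start_alt
  have hsub : ("\"" : String).toList = ['"'] := rfl
  have hcount : PySem.Str.count text "\"" = text.toList.count '"' := by
    rw [PySem.Str.count_eq, hsub, pv_count_singleton]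
  have hrfind : PySem.Str.rfind text "\"" = if text.toList.count '"' = 0 then -1 else pvLastQ text.toList := by
    rw [PySem.Str.rfind_eq, hsub, pv_rfind_singleton]
  have hlen : PySem.Str.len text = (text.toList.length : Int) := by simp
  simp only [hlen, hcount, hrfind]
  rw [pv_portA_fold]
  have hfst := pv_loopA_fst text.toList 0 false (-1)
  by_cases hodd : text.toList.count '"' % 2 = 1
  · have h1 : ((PySem.List.enumerate text.toList 0).foldl pvStepA (false, -1)).1 = true := by
      rw [hfst]; simp [hodd]
    have hne : text.toList.count '"' ≠ 0 := by omega
    have h2 := pv_loopA_snd text.toList 0 false (-1) h1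
    simp only [h1, if_pos rfl, h2, hne, if_neg hne, if_pos hodd]
    simp
  · have h1 : ((PySem.List.enumerate text.toList 0).foldl pvStepA (false, -1)).1 = false := by
      rw [hfst]; simp [hodd]
    simp [h1, hodd]
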